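-- pv_equiv track=rewrite | github.com/hhalvorsen/AdventOfCode | Python/Luke 17/new_attempt.py | check_nearby_positions
-- ===== SOURCE A (Python) =====
-- def check_nearby_positions(position, a_positions):
--     counter = 0
--     for w in range(-1, 2):
--         for z in range(-1, 2):
--             for y in range(-1, 2):
--                 for x in range(-1, 2):
--                     if [w, z, y, x] != [0, 0, 0, 0]:
--                         nb_position = [position[0]+w, position[1]+z, position[2]+y, position[3]+x]
--                         if nb_position in a_positions:
--                             counter += 1
--     return counter
-- ===== SOURCE B (Python) =====
-- def check_nearby_positions(position, a_positions):
--     c = (position[0], position[1], position[2], position[3])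
--     found = set()
--     for p in a_positions:
--         if len(p) == 4:
--             a, b, y, d = p
--             if (a, b, y, d) != c and abs(a - c[0]) <= 1 and abs(b - c[1]) <= 1 \
--                     and abs(y - c[2]) <= 1 and abs(d - c[3]) <= 1:
--                 found.add((a, b, y, d))
--     return len(found)
-- ===== Notes on version B (the rewrite author's own statement) =====
-- stated objective: alternative
-- what changed: Instead of enumerating all 80 nonzero offsets in {-1,0,1}^4 and testing each neighbour cell for membership in a_positions, B makes a single pass over a_positions, collecting into a dedup set the distinct stored points that lie in the 3^4 box around position (excluding position itself), and returns its size.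
import Mathlib
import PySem

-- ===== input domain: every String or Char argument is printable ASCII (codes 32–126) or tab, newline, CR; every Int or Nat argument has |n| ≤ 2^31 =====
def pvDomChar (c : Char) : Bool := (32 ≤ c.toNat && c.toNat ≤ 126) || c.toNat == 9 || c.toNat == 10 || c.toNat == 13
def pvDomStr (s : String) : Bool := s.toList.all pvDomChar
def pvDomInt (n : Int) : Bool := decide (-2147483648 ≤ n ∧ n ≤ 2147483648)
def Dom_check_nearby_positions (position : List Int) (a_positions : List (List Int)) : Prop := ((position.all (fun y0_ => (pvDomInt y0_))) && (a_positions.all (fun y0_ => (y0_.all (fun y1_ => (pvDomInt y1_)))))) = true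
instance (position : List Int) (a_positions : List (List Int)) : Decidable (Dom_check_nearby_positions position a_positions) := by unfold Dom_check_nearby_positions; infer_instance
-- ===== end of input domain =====

-- B replaces A's scan of all 80 nonzero offsets in {-1,0,1}^4 (each with a linear
-- membership test on a_positions) by a single pass over a_positions collecting the
-- distinct stored points inside the 3^4 box around position; objective: alternative decomposition.


-- ===== PORT A =====
-- position[k] is ported as pyGetD (total form); Pre_ below excludes exactly the
-- inputs (position shorter than 4) on which the Python raises IndexError.
def check_nearby_positions (position : List Int) (a_positions : List (List Int)) : Int :=
  (PySem.List.pyRange (-1) 2 1).foldl (fun counter w =>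
    (PySem.List.pyRange (-1) 2 1).foldl (fun counter z =>
      (PySem.List.pyRange (-1) 2 1).foldl (fun counter y =>
        (PySem.List.pyRange (-1) 2 1).foldl (fun counter x =>
          if ([w, z, y, x] : List Int) ≠ [0, 0, 0, 0] then
            let nb_position : List Int :=
              [PySem.List.pyGetD position 0 0 + w, PySem.List.pyGetD position 1 0 + z,
               PySem.List.pyGetD position 2 0 + y, PySem.List.pyGetD position 3 0 + x]
            if nb_position ∈ a_positions then counter + 1 else counter
          else counter) counter) counter) counter) 0

-- ===== PORT B =====
-- One pass over a_positions; 'found' is the Python set of kept points (as 4-tuples there,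
-- kept as the 4-element lists here).
def check_nearby_positions_alt (position : List Int) (a_positions : List (List Int)) : Int :=
  let c0 := PySem.List.pyGetD position 0 0
  let c1 := PySem.List.pyGetD position 1 0
  let c2 := PySem.List.pyGetD position 2 0
  let c3 := PySem.List.pyGetD position 3 0
  let found : PySem.Set (List Int) := a_positions.foldl (fun s p =>
    match p with
    | [a, b, y, d] =>
        if ([a, b, y, d] : List Int) ≠ [c0, c1, c2, c3] ∧ |a - c0| ≤ 1 ∧ |b - c1| ≤ 1 ∧
             |y - c2| ≤ 1 ∧ |d - c3| ≤ 1 then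
          PySem.Set.add s [a, b, y, d]
        else s
    | _ => s) PySem.Set.empty
  PySem.Set.len found

-- ===== PRECONDITION & SPEC =====
-- Pre_ excludes exactly the inputs where the Python A raises IndexError (position[0..3]).
def Pre_check_nearby_positions (position : List Int) (a_positions : List (List Int)) : Prop :=
  4 ≤ position.length
instance (position : List Int) (a_positions : List (List Int)) : Decidable (Pre_check_nearby_positions position a_positions) := by unfold Pre_check_nearby_positions; infer_instance
def pvWitness_check_nearby_positions : List Int × List (List Int) := ([0, 0, 0, 0], [[0, 0, 0, 1], [1, 1, 1, 1]])
def Spec_check_nearby_positions (position : List Int) (a_positions : List (List Int)) (out : Int) : Prop := out = check_nearby_positions_alt position a_positions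
instance (position : List Int) (a_positions : List (List Int)) (out : Int) : Decidable (Spec_check_nearby_positions position a_positions out) := by unfold Spec_check_nearby_positions; infer_instance

-- ===== CLAIM (what is proved, stated in full; the proofs are below) =====
def Claim_equal_check_nearby_positions : Prop := ∀ (position : List Int) (a_positions : List (List Int)), Dom_check_nearby_positions position a_positions → Pre_check_nearby_positions position a_positions → Spec_check_nearby_positions position a_positions (check_nearby_positions position a_positions)

-- ===== LEMMAS AND PROOFS =====

-- The 81 offsets of the 3^4 grid, in A's enumeration order.
def pvQuads : List (Int × Int × Int × Int) :=
  ([-1, 0, 1] : List Int).flatMap fun w => ([-1, 0, 1] : List Int).flatMap fun z =>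
    ([-1, 0, 1] : List Int).flatMap fun y => ([-1, 0, 1] : List Int).map fun x => (w, z, y, x)

-- The neighbour cell A builds from an offset quadruple.
def pvNb (c0 c1 c2 c3 : Int) (q : Int × Int × Int × Int) : List Int :=
  [c0 + q.1, c1 + q.2.1, c2 + q.2.2.1, c3 + q.2.2.2]

-- B's keep-condition as a Bool predicate on a stored point.
def pvCondB (c0 c1 c2 c3 : Int) (p : List Int) : Bool :=
  match p with
  | [a, b, y, d] =>
      decide (([a, b, y, d] : List Int) ≠ [c0, c1, c2, c3] ∧ |a - c0| ≤ 1 ∧ |b - c1| ≤ 1 ∧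
        |y - c2| ≤ 1 ∧ |d - c3| ≤ 1)
  | _ => false

lemma pvQuads_mem (q : Int × Int × Int × Int) :
    q ∈ pvQuads ↔ |q.1| ≤ 1 ∧ |q.2.1| ≤ 1 ∧ |q.2.2.1| ≤ 1 ∧ |q.2.2.2| ≤ 1 := by
  obtain ⟨w, z, y, x⟩ := q
  simp only [pvQuads, List.mem_flatMap, List.mem_map, List.mem_cons,
    Prod.mk.injEq, abs_le]
  constructor
  · rintro ⟨w', hw, z', hz, y', hy, x', hx, rfl, rfl, rfl, rfl⟩
    simp only [List.not_mem_nil, or_false] at *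
    refine ⟨?_, ?_, ?_, ?_⟩ <;> rcases hw with rfl|rfl|rfl <;> rcases hz with rfl|rfl|rfl <;>
      rcases hy with rfl|rfl|rfl <;> rcases hx with rfl|rfl|rfl <;> decide
  · rintro ⟨hw, hz, hy, hx⟩
    exact ⟨w, by omega, z, by omega, y, by omega, x, by omega, rfl, rfl, rfl, rfl⟩

lemma pvQuads_nodup : pvQuads.Nodup := by decide

lemma pvNb_inj (c0 c1 c2 c3 : Int) (q q' : Int × Int × Int × Int)
    (h : pvNb c0 c1 c2 c3 q = pvNb c0 c1 c2 c3 q') : q = q' := by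
  obtain ⟨w, z, y, x⟩ := q; obtain ⟨w', z', y', x'⟩ := q'
  simp only [pvNb, List.cons.injEq, and_true, Prod.mk.injEq] at h ⊢
  omega

-- A's nested fold counts the offsets q ≠ 0 whose neighbour cell is stored.
lemma pvA_eq_countP (position : List Int) (a_positions : List (List Int)) :
    check_nearby_positions position a_positions =
      ((pvQuads.countP fun q => decide (q ≠ (0, 0, 0, 0)) &&
        decide (pvNb (PySem.List.pyGetD position 0 0) (PySem.List.pyGetD position 1 0)
          (PySem.List.pyGetD position 2 0) (PySem.List.pyGetD position 3 0) q ∈ a_positions)) : Int) := by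
  have hr : PySem.List.pyRange (-1) 2 1 = [-1, 0, 1] := by decide
  unfold check_nearby_positions
  rw [hr]
  simp only [← ite_and, PySem.List.foldl_ite_add_one, PySem.List.foldl_add]
  have hp : ∀ w z y x : Int,
      (decide (([w, z, y, x] : List Int) ≠ [0, 0, 0, 0] ∧
        [PySem.List.pyGetD position 0 0 + w, PySem.List.pyGetD position 1 0 + z,
         PySem.List.pyGetD position 2 0 + y, PySem.List.pyGetD position 3 0 + x] ∈ a_positions)) =
      (decide ((w, z, y, x) ≠ ((0, 0, 0, 0) : Int × Int × Int × Int)) &&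
        decide (pvNb (PySem.List.pyGetD position 0 0) (PySem.List.pyGetD position 1 0)
          (PySem.List.pyGetD position 2 0) (PySem.List.pyGetD position 3 0) (w, z, y, x) ∈ a_positions)) := by
    intro w z y x
    simp [pvNb, Prod.ext_iff]
    rfl
  simp only [pvQuads, List.countP_flatMap, List.countP_map, Function.comp_def, hp]
  simp only [List.map_map, Function.comp_def, Nat.cast_list_sum]
  rw [zero_add]

-- B's loop step is: keep p iff pvCondB holds of it.
lemma pvB_step_eq (c0 c1 c2 c3 : Int) :
    (fun (s : PySem.Set (List Int)) (p : List Int) =>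
      match p with
      | [a, b, y, d] =>
          if ([a, b, y, d] : List Int) ≠ [c0, c1, c2, c3] ∧ |a - c0| ≤ 1 ∧ |b - c1| ≤ 1 ∧
               |y - c2| ≤ 1 ∧ |d - c3| ≤ 1 then
            PySem.Set.add s [a, b, y, d]
          else s
      | _ => s) =
    fun s p => if pvCondB c0 c1 c2 c3 p then PySem.Set.add s p else s := by
  funext s p
  match p with
  | [] => simp [pvCondB]
  | [a] => simp [pvCondB]
  | [a, b] => simp [pvCondB]
  | [a, b, y] => simp [pvCondB]
  | a :: b :: y :: d :: e :: rest => simp [pvCondB]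
  | [a, b, y, d] => simp only [pvCondB, decide_eq_true_eq]

lemma pv_mem_foldl_add_if {α : Type} [BEq α] [LawfulBEq α] (C : α → Bool) (l : List α)
    (s : PySem.Set α) (r : α) :
    r ∈ l.foldl (fun s p => if C p then PySem.Set.add s p else s) s ↔
      r ∈ s ∨ (r ∈ l ∧ C r = true) := by
  induction l generalizing s with
  | nil => simp
  | cons p t ih =>
    rw [List.foldl_cons, ih]
    by_cases h : C p
    · rw [if_pos h]
      constructor
      · rintro (hm | h2)
        · rcases (PySem.Set.mem_add _ _ _).1 hm with hs | rfl
          · exact Or.inl hs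
          · exact Or.inr ⟨List.mem_cons_self, h⟩
        · exact Or.inr ⟨List.mem_cons_of_mem _ h2.1, h2.2⟩
      · rintro (hs | ⟨hm, hc⟩)
        · exact Or.inl ((PySem.Set.mem_add _ _ _).2 (Or.inl hs))
        · rcases List.mem_cons.1 hm with rfl | hm'
          · exact Or.inl ((PySem.Set.mem_add _ _ _).2 (Or.inr rfl))
          · exact Or.inr ⟨hm', hc⟩
    · rw [if_neg h]
      constructor
      · rintro (hs | h2)
        · exact Or.inl hs
        · exact Or.inr ⟨List.mem_cons_of_mem _ h2.1, h2.2⟩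
      · rintro (hs | ⟨hm, hc⟩)
        · exact Or.inl hs
        · rcases List.mem_cons.1 hm with rfl | hm'
          · exact absurd hc h
          · exact Or.inr ⟨hm', hc⟩

lemma pv_nodup_foldl_add_if {α : Type} [BEq α] [LawfulBEq α] (C : α → Bool) (l : List α)
    (s : PySem.Set α) (hs : s.Nodup) :
    (l.foldl (fun s p => if C p then PySem.Set.add s p else s) s).Nodup := by
  induction l generalizing s with
  | nil => exact hs
  | cons p t ih =>
    rw [List.foldl_cons]
    apply ih
    split
    · exact PySem.Set.nodup_add _ _ hs
    · exact hs

-- A point satisfies B's condition iff it is the neighbour cell of a nonzero offset.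
lemma pvCondB_iff (c0 c1 c2 c3 : Int) (r : List Int) :
    pvCondB c0 c1 c2 c3 r = true ↔
      ∃ q ∈ pvQuads, q ≠ (0, 0, 0, 0) ∧ r = pvNb c0 c1 c2 c3 q := by
  constructor
  · intro hc
    match r with
    | [a, b, y, d] =>
      simp only [pvCondB, decide_eq_true_eq] at hc
      obtain ⟨hne, h0, h1, h2, h3⟩ := hc
      refine ⟨(a - c0, b - c1, y - c2, d - c3), ?_, ?_, ?_⟩
      · rw [pvQuads_mem]; exact ⟨h0, h1, h2, h3⟩
      · simp only [List.cons.injEq, and_true, ne_eq, Prod.mk.injEq] at hne ⊢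
        omega
      · simp only [pvNb]
        norm_num
  · rintro ⟨⟨w, z, y, x⟩, hq, h0, rfl⟩
    rw [pvQuads_mem] at hq
    simp only [pvCondB, pvNb, decide_eq_true_eq]
    simp only [ne_eq, Prod.mk.injEq] at h0
    simp only [List.cons.injEq, and_true, ne_eq]
    constructor
    · omega
    · simp only [add_sub_cancel_left, abs_le] at hq ⊢
      exact ⟨hq.1, hq.2.1, hq.2.2.1, hq.2.2.2⟩

-- The two counts agree: perm of two nodup lists with the same members.
lemma pv_count_eq (c0 c1 c2 c3 : Int) (a_positions : List (List Int)) :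
    (pvQuads.countP fun q => decide (q ≠ (0, 0, 0, 0)) &&
        decide (pvNb c0 c1 c2 c3 q ∈ a_positions)) =
      (a_positions.foldl (fun s p => if pvCondB c0 c1 c2 c3 p then PySem.Set.add s p else s)
        PySem.Set.empty).length := by
  set P : Int × Int × Int × Int → Bool := fun q => decide (q ≠ (0, 0, 0, 0)) &&
    decide (pvNb c0 c1 c2 c3 q ∈ a_positions) with hP
  set F := a_positions.foldl (fun s p => if pvCondB c0 c1 c2 c3 p then PySem.Set.add s p else s)
    PySem.Set.empty with hF
  have h1 : pvQuads.countP P = ((pvQuads.filter P).map (pvNb c0 c1 c2 c3)).length := by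
    rw [List.length_map, List.countP_eq_length_filter]
  rw [h1]
  have hnd1 : ((pvQuads.filter P).map (pvNb c0 c1 c2 c3)).Nodup :=
    (pvQuads_nodup.filter P).map_on
      (fun q _ q' _ h => pvNb_inj c0 c1 c2 c3 q q' h)
  have hnd2 : F.Nodup :=
    pv_nodup_foldl_add_if (pvCondB c0 c1 c2 c3) a_positions PySem.Set.empty List.nodup_nil
  have hmem : ∀ r, r ∈ (pvQuads.filter P).map (pvNb c0 c1 c2 c3) ↔ r ∈ F := by
    intro r
    rw [hF, pv_mem_foldl_add_if]
    simp only [List.mem_map, List.mem_filter, hP, Bool.and_eq_true, decide_eq_true_eq,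
      PySem.Set.empty, List.not_mem_nil, false_or, pvCondB_iff]
    constructor
    · rintro ⟨q, ⟨hq, h0, hin⟩, rfl⟩
      exact ⟨hin, q, hq, h0, rfl⟩
    · rintro ⟨hin, q, hq, h0, rfl⟩
      exact ⟨q, ⟨hq, h0, hin⟩, rfl⟩
  exact ((List.perm_ext_iff_of_nodup hnd1 hnd2).2 hmem).length_eq

-- ===== VERDICT (by name: the statement is the Claim_ definition above) =====
theorem check_nearby_positions_spec : Claim_equal_check_nearby_positions := by
  intro position a_positions _ _
  unfold Spec_check_nearby_positions check_nearby_positions_alt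
  rw [pvA_eq_countP]
  simp only [pvB_step_eq, PySem.Set.len]
  rw [pv_count_eq]
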